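-- pv_equiv track=rewrite | github.com/facebook/rocksdb | tools/advisor/advisor/db_options_parser.py | get_options_diff
-- ===== SOURCE A (Python) =====
-- def get_options_diff(opt_old, opt_new):
--     # type: Dict[option, Dict[col_fam, value]] X 2 ->
--     # Dict[option, Dict[col_fam, Tuple(old_value, new_value)]]
--     # note: diff should contain a tuple of values only if they are
--     # different from each other
--     options_union = set(opt_old.keys()).union(set(opt_new.keys()))
--     diff = {}
--     for opt in options_union:
--         diff[opt] = {}
--         # if option in options_union, then it must be in one of the configs
--         if opt not in opt_old:
--             for col_fam in opt_new[opt]: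
--                 diff[opt][col_fam] = (None, opt_new[opt][col_fam])
--         elif opt not in opt_new:
--             for col_fam in opt_old[opt]:
--                 diff[opt][col_fam] = (opt_old[opt][col_fam], None)
--         else:
--             for col_fam in opt_old[opt]:
--                 if col_fam in opt_new[opt]:
--                     if opt_old[opt][col_fam] != opt_new[opt][col_fam]:
--                         diff[opt][col_fam] = (
--                             opt_old[opt][col_fam],
--                             opt_new[opt][col_fam]
--                         )
--                 else:
--                     diff[opt][col_fam] = (opt_old[opt][col_fam], None)
--             for col_fam in opt_new[opt]:
--                 if col_fam in opt_old[opt]: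
--                     if opt_old[opt][col_fam] != opt_new[opt][col_fam]:
--                         diff[opt][col_fam] = (
--                             opt_old[opt][col_fam],
--                             opt_new[opt][col_fam]
--                         )
--                 else:
--                     diff[opt][col_fam] = (None, opt_new[opt][col_fam])
--         if not diff[opt]:
--             diff.pop(opt)
--     return diff
-- ===== SOURCE B (Python) =====
-- def get_options_diff(opt_old, opt_new):
--     # Single union-driven pass: for every option and every column family in the
--     # union of both sides, decide the diff entry from the two lookups at once.
--     diff = {}
--     for opt in set(opt_old.keys()).union(set(opt_new.keys())):
--         old_cfs = opt_old.get(opt, {})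
--         new_cfs = opt_new.get(opt, {})
--         entries = {}
--         for col_fam in set(old_cfs.keys()).union(set(new_cfs.keys())):
--             in_old = col_fam in old_cfs
--             in_new = col_fam in new_cfs
--             if in_old and in_new:
--                 if old_cfs[col_fam] != new_cfs[col_fam]:
--                     entries[col_fam] = (old_cfs[col_fam], new_cfs[col_fam])
--             elif in_old:
--                 entries[col_fam] = (old_cfs[col_fam], None)
--             else:
--                 entries[col_fam] = (None, new_cfs[col_fam])
--         if entries:
--             diff[opt] = entries
--     return diff
-- ===== Notes on version B (the rewrite author's own statement) =====
-- stated objective: simpler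
-- what changed: A splits the work into four membership-gated loops (option only in new, only in old, and two passes over old then new column families with re-assignment) plus an insert-then-pop of empty options; B does one uniform pass over the union of column families per option, deciding each entry from the two lookups at once, and only inserts non-empty option entries.
import Mathlib
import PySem

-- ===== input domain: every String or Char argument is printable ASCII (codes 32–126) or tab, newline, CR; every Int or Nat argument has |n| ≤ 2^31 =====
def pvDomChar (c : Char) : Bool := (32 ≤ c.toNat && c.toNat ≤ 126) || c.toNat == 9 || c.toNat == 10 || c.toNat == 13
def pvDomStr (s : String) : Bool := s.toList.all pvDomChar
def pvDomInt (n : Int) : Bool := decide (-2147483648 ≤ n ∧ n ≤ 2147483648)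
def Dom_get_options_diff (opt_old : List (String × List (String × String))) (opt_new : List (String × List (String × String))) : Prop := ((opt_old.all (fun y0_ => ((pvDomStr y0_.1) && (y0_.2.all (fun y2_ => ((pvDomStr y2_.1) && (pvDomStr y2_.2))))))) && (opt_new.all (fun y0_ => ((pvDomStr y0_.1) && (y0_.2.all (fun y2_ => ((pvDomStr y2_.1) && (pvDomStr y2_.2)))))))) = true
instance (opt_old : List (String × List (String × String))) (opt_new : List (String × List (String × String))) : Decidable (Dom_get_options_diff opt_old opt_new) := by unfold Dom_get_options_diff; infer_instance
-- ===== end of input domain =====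

-- B replaces A's four membership-split loops by one uniform union-driven pass per option
-- (same result, simpler decomposition); equivalence is about the return value (no mutation).

-- Both Python functions receive dict-of-dict arguments; decode the association lists into the
-- Python dicts they denote (duplicate keys: last value wins, first position — Python `dict`).
def pvToDict (l : List (String × List (String × String))) : PySem.Dict String (PySem.Dict String String) :=
  PySem.Dict.ofList (l.map (fun p => (p.1, PySem.Dict.ofList p.2)))

-- ===== PORT A =====
def get_options_diff (opt_old : List (String × List (String × String))) (opt_new : List (String × List (String × String))) : List (String × List (String × Option String × Option String)) :=
  let dOld := pvToDict opt_old
  let dNew := pvToDict opt_new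
  let options_union : PySem.Set String :=
    PySem.Set.union (PySem.Set.ofList dOld.keys) (PySem.Set.ofList dNew.keys)
  let diff : PySem.Dict String (PySem.Dict String (Option String × Option String)) :=
    List.foldl (fun diff opt =>
      -- diff[opt] = {}
      let diff := diff.insert opt PySem.Dict.empty
      let diff :=
        if dOld.contains opt = false then
          -- for col_fam in opt_new[opt]: diff[opt][col_fam] = (None, opt_new[opt][col_fam])
          let nd := dNew.getD opt PySem.Dict.empty
          List.foldl (fun dd cf =>
            dd.modify opt PySem.Dict.empty (fun inn => inn.insert cf (none, nd.get? cf))) diff nd.keys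
        else if dNew.contains opt = false then
          -- for col_fam in opt_old[opt]: diff[opt][col_fam] = (opt_old[opt][col_fam], None)
          let od := dOld.getD opt PySem.Dict.empty
          List.foldl (fun dd cf =>
            dd.modify opt PySem.Dict.empty (fun inn => inn.insert cf (od.get? cf, none))) diff od.keys
        else
          let od := dOld.getD opt PySem.Dict.empty
          let nd := dNew.getD opt PySem.Dict.empty
          -- for col_fam in opt_old[opt]: …
          let diff := List.foldl (fun dd cf =>
            if nd.contains cf then
              (if od.get? cf ≠ nd.get? cf then
                dd.modify opt PySem.Dict.empty (fun inn => inn.insert cf (od.get? cf, nd.get? cf))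
              else dd)
            else dd.modify opt PySem.Dict.empty (fun inn => inn.insert cf (od.get? cf, none))) diff od.keys
          -- for col_fam in opt_new[opt]: …
          List.foldl (fun dd cf =>
            if od.contains cf then
              (if od.get? cf ≠ nd.get? cf then
                dd.modify opt PySem.Dict.empty (fun inn => inn.insert cf (od.get? cf, nd.get? cf))
              else dd)
            else dd.modify opt PySem.Dict.empty (fun inn => inn.insert cf (none, nd.get? cf))) diff nd.keys
      -- if not diff[opt]: diff.pop(opt)
      if (diff.getD opt PySem.Dict.empty).size = 0 then diff.erase opt else diff)
      PySem.Dict.empty options_union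
  diff.items.map (fun p => (p.1, p.2.items))

-- ===== PORT B =====
def get_options_diff_alt (opt_old : List (String × List (String × String))) (opt_new : List (String × List (String × String))) : List (String × List (String × Option String × Option String)) :=
  let dOld := pvToDict opt_old
  let dNew := pvToDict opt_new
  let diff : PySem.Dict String (PySem.Dict String (Option String × Option String)) :=
    List.foldl (fun diff opt =>
      let old_cfs := dOld.getD opt PySem.Dict.empty
      let new_cfs := dNew.getD opt PySem.Dict.empty
      let entries :=
        List.foldl (fun es cf =>
          match old_cfs.get? cf, new_cfs.get? cf with
          | some ov, some nv => if ov ≠ nv then es.insert cf (some ov, some nv) else es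
          | some ov, none    => es.insert cf (some ov, none)
          | none,    _       => es.insert cf (none, new_cfs.get? cf))
          PySem.Dict.empty
          (PySem.Set.union (PySem.Set.ofList old_cfs.keys) (PySem.Set.ofList new_cfs.keys))
      if entries.size = 0 then diff else diff.insert opt entries)
      PySem.Dict.empty
      (PySem.Set.union (PySem.Set.ofList dOld.keys) (PySem.Set.ofList dNew.keys))
  diff.items.map (fun p => (p.1, p.2.items))

-- ===== PRECONDITION & SPEC =====
def Spec_get_options_diff (opt_old : List (String × List (String × String))) (opt_new : List (String × List (String × String))) (out : List (String × List (String × Option String × Option String))) : Prop := out = get_options_diff_alt opt_old opt_new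
instance (opt_old : List (String × List (String × String))) (opt_new : List (String × List (String × String))) (out : List (String × List (String × Option String × Option String))) : Decidable (Spec_get_options_diff opt_old opt_new out) := by unfold Spec_get_options_diff; infer_instance

-- ===== CLAIM (what is proved, stated in full; the proofs are below) =====
def Claim_equal_get_options_diff : Prop := ∀ (opt_old : List (String × List (String × String))) (opt_new : List (String × List (String × String))), Dom_get_options_diff opt_old opt_new → Spec_get_options_diff opt_old opt_new (get_options_diff opt_old opt_new)

-- ===== LEMMAS AND PROOFS =====

-- `Set.update` on a duplicate-free list appends exactly the fresh elements.
theorem pv_set_update_eq (l : List String) (s : List String) (hl : l.Nodup) :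
    PySem.Set.update s l = s ++ l.filter (fun x => decide (x ∉ s)) := by
  induction l generalizing s with
  | nil => simp [PySem.Set.update]
  | cons x t ih =>
    simp only [List.nodup_cons] at hl
    show PySem.Set.update (PySem.Set.add s x) t = _
    by_cases hx : x ∈ s
    · rw [show PySem.Set.add s x = s by simp [PySem.Set.add, hx]]
      rw [ih s hl.2]
      simp [hx]
    · rw [show PySem.Set.add s x = s ++ [x] by simp [PySem.Set.add, hx]]
      rw [ih _ hl.2]
      simp only [List.filter_cons, hx, decide_not]
      simp [List.append_assoc]
      refine List.filter_congr ?_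
      intro y hy
      have hyx : y ≠ x := fun h => hl.1 (h ▸ hy)
      simp [hyx]

theorem pv_ofList_nodup_eq (l : List String) (hl : l.Nodup) : PySem.Set.ofList l = l := by
  have h : PySem.Set.ofList l = PySem.Set.update [] l := rfl
  rw [h, pv_set_update_eq l [] hl]
  simp

theorem pv_union_keys (a b : List String) (ha : a.Nodup) (hb : b.Nodup) :
    (PySem.Set.union (PySem.Set.ofList a) (PySem.Set.ofList b) : List String)
      = a ++ b.filter (fun x => decide (x ∉ a)) := by
  have h : PySem.Set.union (PySem.Set.ofList a) (PySem.Set.ofList b)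
      = PySem.Set.update (PySem.Set.ofList a) (PySem.Set.ofList b) := rfl
  rw [h, pv_ofList_nodup_eq a ha, pv_ofList_nodup_eq b hb, pv_set_update_eq b a hb]

theorem pv_union_keys_nodup (a b : List String) (ha : a.Nodup) (hb : b.Nodup) :
    (PySem.Set.union (PySem.Set.ofList a) (PySem.Set.ofList b) : List String).Nodup := by
  rw [pv_union_keys a b ha hb]
  refine List.Nodup.append ha (hb.filter _) ?_
  intro x hxa hxf
  have h := List.of_mem_filter hxf
  simp at h
  exact h hxa

-- A fold whose every step, on a fresh key, either skips or inserts `f k`, appends its entries.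
theorem pv_items_foldl_step {ν : Type} (l : List String)
    (S : PySem.Dict String ν → String → PySem.Dict String ν) (f : String → Option ν)
    (hS : ∀ (d : PySem.Dict String ν) (k : String), k ∈ l → d.contains k = false →
      S d k = match f k with | some v => d.insert k v | none => d)
    (d : PySem.Dict String ν) (hl : l.Nodup) (hfresh : ∀ k ∈ l, d.contains k = false) :
    (List.foldl S d l).items = d.items ++ l.filterMap (fun k => (f k).map (fun v => (k, v))) := by
  induction l generalizing d with
  | nil => simp
  | cons k t ih =>
    simp only [List.nodup_cons] at hl
    have hkd : d.contains k = false := hfresh k (by simp)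
    rw [List.foldl_cons, hS d k (by simp) hkd]
    cases hf : f k with
    | none =>
      rw [ih (fun d' k' ht => hS d' k' (by simp [ht])) d hl.2 (fun k' hk' => hfresh k' (by simp [hk']))]
      simp [hf]
    | some v =>
      rw [ih (fun d' k' ht => hS d' k' (by simp [ht])) (d.insert k v) hl.2 ?_]
      · rw [PySem.Dict.items_insert_of_not_contains d v hkd]
        simp [hf]
      · intro k' hk'
        rw [PySem.Dict.contains_insert]
        have hne : k' ≠ k := fun h => hl.1 (h ▸ hk')
        simp [hne, hfresh k' (by simp [hk'])]

theorem pv_map_fst_filterMap {ν : Type} (l : List String) (f : String → Option ν) :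
    (l.filterMap (fun k => (f k).map (fun v => (k, v)))).map Prod.fst
      = l.filter (fun k => (f k).isSome) := by
  induction l with
  | nil => simp
  | cons k t ih => cases hf : f k <;> simp [hf, ih]

-- Re-inserting the value already stored is the identity.
theorem pv_insert_self_of_get? {ν : Type} (d : PySem.Dict String ν) (k : String) (v : ν)
    (h : d.get? k = some v) (hnd : d.keys.Nodup) : d.insert k v = d := by
  apply PySem.Dict.ext
  have hc : d.contains k = true := by
    rw [PySem.Dict.contains_eq_isSome_get?, h]; rfl
  rw [PySem.Dict.items_insert_of_contains d v hc]
  refine List.map_congr_left ?_ |>.trans (List.map_id _)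
  intro p hp
  by_cases hpk : p.1 = k
  · have hv : d.get? p.1 = some p.2 := PySem.Dict.get?_of_mem_items d (by exact hp) hnd
    rw [hpk, h] at hv
    have hpe : p = (k, v) := by
      obtain ⟨p1, p2⟩ := p
      simp only at hpk
      subst hpk
      exact Prod.mk.injEq .. ▸ congrArg _ (Option.some_inj.mp hv).symm
    rw [hpe]
    simp
  · simp [hpk]

theorem pv_erase_insert_fresh {ν : Type} (d : PySem.Dict String ν) (k : String) (v : ν)
    (h : d.contains k = false) : (d.insert k v).erase k = d := by
  apply PySem.Dict.ext
  simp only [PySem.Dict.erase, PySem.Dict.items_insert_of_not_contains d v h, List.filter_append,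
    BEq.rfl, Bool.not_true, Bool.false_eq_true, not_false_eq_true, List.filter_cons_of_neg,
    List.filter_nil, List.append_nil, List.filter_eq_self, Bool.not_eq_eq_eq_not,
    beq_eq_false_iff_ne, ne_eq, Prod.forall]
  intro a b hab hak
  rw [hak] at hab
  have hc : d.contains k = true := (PySem.Dict.contains_iff_mem_keys d k).mpr
    (PySem.Dict.mem_keys_of_mem_items d hab)
  rw [hc] at h
  exact Bool.true_eq_false.mp h

-- Lifting: a loop of `modify opt` steps over `diff.insert opt inn` is an inner loop on `inn`.
theorem pv_foldl_hom_insert {α : Type} (l : List α) (opt : String)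
    (F : PySem.Dict String (PySem.Dict String (Option String × Option String)) → α → PySem.Dict String (PySem.Dict String (Option String × Option String)))
    (G : PySem.Dict String (Option String × Option String) → α → PySem.Dict String (Option String × Option String))
    (hF : ∀ (dd : PySem.Dict String (PySem.Dict String (Option String × Option String))) (inn : PySem.Dict String (Option String × Option String)) (a : α), F (dd.insert opt inn) a = dd.insert opt (G inn a))
    (diff : PySem.Dict String (PySem.Dict String (Option String × Option String)))
    (inn : PySem.Dict String (Option String × Option String)) :
    List.foldl F (diff.insert opt inn) l = diff.insert opt (List.foldl G inn l) := by
  induction l generalizing inn with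
  | nil => rfl
  | cons a t ih =>
    rw [List.foldl_cons, hF diff inn a]
    exact ih (G inn a)

-- Every inner dict produced by `pvToDict` has duplicate-free keys.
theorem pv_toDict_inner_nodup (l : List (String × List (String × String))) (opt : String) :
    ((pvToDict l).getD opt PySem.Dict.empty).keys.Nodup := by
  have h : ∀ (ps : List (String × PySem.Dict String String)),
      PySem.Dict.ofList ps = ps.foldl (fun d p => d.insert p.1 p.2) PySem.Dict.empty := fun _ => rfl
  unfold pvToDict
  rw [h]
  induction l using List.reverseRecOn with
  | nil => simp [PySem.Dict.getD_empty, PySem.Dict.keys_empty]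
  | append_singleton t p ih =>
    rw [List.map_append, List.foldl_append]
    simp only [List.map_cons, List.map_nil, List.foldl_cons, List.foldl_nil]
    rw [PySem.Dict.getD_insert]
    split
    · exact PySem.Dict.nodup_keys_ofList p.2
    · exact ih

-- The per-column-family decision of B, as an optional entry.
def pvF (od nd : PySem.Dict String String) (cf : String) : Option (Option String × Option String) :=
  match od.get? cf, nd.get? cf with
  | some ov, some nv => if ov ≠ nv then some (some ov, some nv) else none
  | some ov, none    => some (some ov, none)
  | none,    _       => some (none, nd.get? cf)

-- B's inner loop, named (definitionally the loop in the port of B).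
def pvEntriesB (od nd : PySem.Dict String String) : PySem.Dict String (Option String × Option String) :=
  List.foldl (fun es cf =>
    match od.get? cf, nd.get? cf with
    | some ov, some nv => if ov ≠ nv then es.insert cf (some ov, some nv) else es
    | some ov, none    => es.insert cf (some ov, none)
    | none,    _       => es.insert cf (none, nd.get? cf))
    PySem.Dict.empty
    (PySem.Set.union (PySem.Set.ofList od.keys) (PySem.Set.ofList nd.keys))

theorem pv_entriesB_items (od nd : PySem.Dict String String)
    (hod : od.keys.Nodup) (hnd : nd.keys.Nodup) :
    (pvEntriesB od nd).items
      = (od.keys ++ nd.keys.filter (fun x => decide (x ∉ od.keys))).filterMap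
          (fun cf => (pvF od nd cf).map (fun v => (cf, v))) := by
  unfold pvEntriesB
  rw [show (PySem.Set.union (PySem.Set.ofList od.keys) (PySem.Set.ofList nd.keys) : List String)
      = od.keys ++ nd.keys.filter (fun x => decide (x ∉ od.keys)) from
    pv_union_keys od.keys nd.keys hod hnd]
  rw [pv_items_foldl_step _ _ (pvF od nd) ?_ PySem.Dict.empty ?_ ?_]
  · simp [show (PySem.Dict.empty : PySem.Dict String (Option String × Option String)).items = []
      from rfl]
  · intro d k _ _
    unfold pvF
    cases ho : od.get? k <;> cases hn : nd.get? k
    all_goals first | rfl | (rename_i ov nv; by_cases h : ov = nv <;> simp [h])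
  · rw [← pv_union_keys od.keys nd.keys hod hnd]
    exact pv_union_keys_nodup od.keys nd.keys hod hnd
  · intro k _
    exact PySem.Dict.contains_empty k


-- A's second both-sides loop: over an accumulator that already stores the differing pairs,
-- every step is a no-op on old column families and a fresh append on new-only ones.
theorem pv_loop2_items (od nd : PySem.Dict String String) (l : List String)
    (d : PySem.Dict String (Option String × Option String)) (hl : l.Nodup)
    (hin : ∀ cf ∈ l, od.contains cf = true → od.get? cf ≠ nd.get? cf →
      d.get? cf = some (od.get? cf, nd.get? cf))
    (hfresh : ∀ cf ∈ l, od.contains cf = false → d.contains cf = false)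
    (hknd : d.keys.Nodup) :
    (List.foldl (fun dd cf =>
        if od.contains cf then
          (if od.get? cf ≠ nd.get? cf then dd.insert cf (od.get? cf, nd.get? cf) else dd)
        else dd.insert cf (none, nd.get? cf)) d l).items
      = d.items ++ l.filterMap (fun cf =>
          if od.contains cf then none else some (cf, ((none : Option String), nd.get? cf))) := by
  induction l generalizing d with
  | nil => simp
  | cons cf t ih =>
    simp only [List.nodup_cons] at hl
    rw [List.foldl_cons]
    by_cases hoc : od.contains cf = true
    · have hstep : (if od.contains cf then
          (if od.get? cf ≠ nd.get? cf then d.insert cf (od.get? cf, nd.get? cf) else d)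
        else d.insert cf (none, nd.get? cf)) = d := by
        rw [if_pos hoc]
        by_cases hne : od.get? cf ≠ nd.get? cf
        · rw [if_pos hne, pv_insert_self_of_get? d cf _ (hin cf (by simp) hoc hne) hknd]
        · rw [if_neg hne]
      rw [hstep, ih d hl.2 (fun c hc => hin c (by simp [hc]))
        (fun c hc => hfresh c (by simp [hc])) hknd]
      simp [hoc]
    · have hb : od.contains cf = false := by
        cases h : od.contains cf
        · rfl
        · exact absurd h hoc
      have hdc : d.contains cf = false := hfresh cf (by simp) hb
      have hstep : (if od.contains cf then
          (if od.get? cf ≠ nd.get? cf then d.insert cf (od.get? cf, nd.get? cf) else d)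
        else d.insert cf (none, nd.get? cf)) = d.insert cf (none, nd.get? cf) := by
        rw [hb]
        rfl
      rw [hstep, ih (d.insert cf (none, nd.get? cf)) hl.2 ?_ ?_
        (PySem.Dict.nodup_keys_insert d cf _ hknd)]
      · rw [PySem.Dict.items_insert_of_not_contains d _ hdc]
        simp [hb]
      · intro c hc hct hcne
        have hne : c ≠ cf := by
          intro h
          rw [h, hb] at hct
          exact Bool.false_eq_true.mp hct
        rw [PySem.Dict.get?_insert_of_ne _ _ hne]
        exact hin c (by simp [hc]) hct hcne
      · intro c hc hcf
        have hne : c ≠ cf := fun h => hl.1 (h ▸ hc)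
        rw [PySem.Dict.contains_insert]
        simp [hne, hfresh c (by simp [hc]) hcf]


-- A's inner computation (any branch) builds exactly B's inner dict.
theorem pv_innerA_eq (od nd : PySem.Dict String String)
    (hod : od.keys.Nodup) (hnd : nd.keys.Nodup) :
    List.foldl (fun inn cf =>
        if od.contains cf then
          (if od.get? cf ≠ nd.get? cf then inn.insert cf (od.get? cf, nd.get? cf) else inn)
        else inn.insert cf (none, nd.get? cf))
      (List.foldl (fun inn cf =>
        if nd.contains cf then
          (if od.get? cf ≠ nd.get? cf then inn.insert cf (od.get? cf, nd.get? cf) else inn)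
        else inn.insert cf (od.get? cf, none)) PySem.Dict.empty od.keys)
      nd.keys
      = pvEntriesB od nd := by
  -- the first loop, as an optional-entry fold
  have h1 : (List.foldl (fun inn cf =>
        if nd.contains cf then
          (if od.get? cf ≠ nd.get? cf then inn.insert cf (od.get? cf, nd.get? cf) else inn)
        else inn.insert cf (od.get? cf, none)) PySem.Dict.empty od.keys).items
      = od.keys.filterMap (fun cf =>
          ((if nd.contains cf then
              (if od.get? cf ≠ nd.get? cf then some (od.get? cf, nd.get? cf) else none)
            else some (od.get? cf, none)) : Option (Option String × Option String)).map
            (fun v => (cf, v))) := by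
    rw [pv_items_foldl_step od.keys _
      (fun cf => if nd.contains cf then
          (if od.get? cf ≠ nd.get? cf then some (od.get? cf, nd.get? cf) else none)
        else some (od.get? cf, none)) ?_ PySem.Dict.empty hod
      (fun k _ => PySem.Dict.contains_empty k)]
    · simp [show (PySem.Dict.empty : PySem.Dict String (Option String × Option String)).items = []
        from rfl]
    · intro d k _ _
      by_cases hnc : nd.contains k = true
      · by_cases hne : od.get? k ≠ nd.get? k <;> simp [hnc, hne]
      · simp [hnc]
  have hkeys1 : (List.foldl (fun inn cf =>
        if nd.contains cf then
          (if od.get? cf ≠ nd.get? cf then inn.insert cf (od.get? cf, nd.get? cf) else inn)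
        else inn.insert cf (od.get? cf, none)) PySem.Dict.empty od.keys).keys
      = od.keys.filter (fun cf =>
          ((if nd.contains cf then
              (if od.get? cf ≠ nd.get? cf then some (od.get? cf, nd.get? cf) else none)
            else some (od.get? cf, none)) : Option (Option String × Option String)).isSome) := by
    show (List.foldl _ PySem.Dict.empty od.keys).items.map Prod.fst = _
    rw [h1, pv_map_fst_filterMap]
  apply PySem.Dict.ext
  rw [pv_loop2_items od nd nd.keys _ hnd ?_ ?_ ?_]
  · rw [h1, pv_entriesB_items od nd hod hnd, List.filterMap_append, List.filterMap_filter]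
    congr 1
    · refine List.filterMap_congr ?_
      intro cf hcf
      have hoc : od.contains cf = true := (PySem.Dict.contains_iff_mem_keys od cf).mpr hcf
      obtain ⟨ov, ho⟩ : ∃ v, od.get? cf = some v := by
        have := PySem.Dict.contains_eq_isSome_get? (d := od) (k := cf)
        rw [hoc] at this
        exact Option.isSome_iff_exists.mp this.symm
      unfold pvF
      cases hn : nd.get? cf
      · have hnc : nd.contains cf = false := (PySem.Dict.get?_eq_none_iff_contains nd cf).mp hn
        simp [ho, hnc]
      · rename_i nv
        have hnc : nd.contains cf = true := by
          rw [PySem.Dict.contains_eq_isSome_get?, hn]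
          rfl
        by_cases hv : ov = nv <;> simp [ho, hnc, hv]
    · refine List.filterMap_congr ?_
      intro cf hcf
      by_cases hoc : od.contains cf = true
      · have : cf ∈ od.keys := (PySem.Dict.contains_iff_mem_keys od cf).mp hoc
        simp [hoc, this]
      · have hb : od.contains cf = false := by
          cases h : od.contains cf
          · rfl
          · exact absurd h hoc
        have hmem : cf ∉ od.keys := fun h =>
          hoc ((PySem.Dict.contains_iff_mem_keys od cf).mpr h)
        have ho : od.get? cf = none := (PySem.Dict.get?_eq_none_iff_contains od cf).mpr hb
        unfold pvF
        simp [hb, hmem, ho]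
  · -- stored differing pairs are already present
    intro cf hcfn hoc hne
    have hcfo : cf ∈ od.keys := (PySem.Dict.contains_iff_mem_keys od cf).mp hoc
    have hnc : nd.contains cf = true := (PySem.Dict.contains_iff_mem_keys nd cf).mpr hcfn
    refine PySem.Dict.get?_of_mem_items _ ?_ (hkeys1 ▸ hod.filter _)
    rw [h1, List.mem_filterMap]
    exact ⟨cf, hcfo, by simp [hnc, hne]⟩
  · -- column families absent from the old side are fresh
    intro cf _ hb
    have hmem : cf ∉ od.keys := fun h => by
      rw [(PySem.Dict.contains_iff_mem_keys od cf).mpr h] at hb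
      exact Bool.true_eq_false.mp hb
    cases hc : PySem.Dict.contains _ cf
    · rfl
    · exfalso
      have := (PySem.Dict.contains_iff_mem_keys _ cf).mp hc
      rw [hkeys1] at this
      exact hmem (List.mem_of_mem_filter this)
  · exact hkeys1 ▸ hod.filter _


-- A's per-option step, named (definitionally the loop body in the port of A).
def pvStepA (dOld dNew : PySem.Dict String (PySem.Dict String String))
    (diff : PySem.Dict String (PySem.Dict String (Option String × Option String))) (opt : String) :
    PySem.Dict String (PySem.Dict String (Option String × Option String)) :=
  let diff := diff.insert opt PySem.Dict.empty
  let diff :=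
    if dOld.contains opt = false then
      let nd := dNew.getD opt PySem.Dict.empty
      List.foldl (fun dd cf =>
        dd.modify opt PySem.Dict.empty (fun inn => inn.insert cf (none, nd.get? cf))) diff nd.keys
    else if dNew.contains opt = false then
      let od := dOld.getD opt PySem.Dict.empty
      List.foldl (fun dd cf =>
        dd.modify opt PySem.Dict.empty (fun inn => inn.insert cf (od.get? cf, none))) diff od.keys
    else
      let od := dOld.getD opt PySem.Dict.empty
      let nd := dNew.getD opt PySem.Dict.empty
      let diff := List.foldl (fun dd cf =>
        if nd.contains cf then
          (if od.get? cf ≠ nd.get? cf then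
            dd.modify opt PySem.Dict.empty (fun inn => inn.insert cf (od.get? cf, nd.get? cf))
          else dd)
        else dd.modify opt PySem.Dict.empty (fun inn => inn.insert cf (od.get? cf, none))) diff od.keys
      List.foldl (fun dd cf =>
        if od.contains cf then
          (if od.get? cf ≠ nd.get? cf then
            dd.modify opt PySem.Dict.empty (fun inn => inn.insert cf (od.get? cf, nd.get? cf))
          else dd)
        else dd.modify opt PySem.Dict.empty (fun inn => inn.insert cf (none, nd.get? cf))) diff nd.keys
  if (diff.getD opt PySem.Dict.empty).size = 0 then diff.erase opt else diff

-- B's per-option step, named (definitionally the loop body in the port of B).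
def pvStepB (dOld dNew : PySem.Dict String (PySem.Dict String String))
    (diff : PySem.Dict String (PySem.Dict String (Option String × Option String))) (opt : String) :
    PySem.Dict String (PySem.Dict String (Option String × Option String)) :=
  let old_cfs := dOld.getD opt PySem.Dict.empty
  let new_cfs := dNew.getD opt PySem.Dict.empty
  let entries :=
    List.foldl (fun es cf =>
      match old_cfs.get? cf, new_cfs.get? cf with
      | some ov, some nv => if ov ≠ nv then es.insert cf (some ov, some nv) else es
      | some ov, none    => es.insert cf (some ov, none)
      | none,    _       => es.insert cf (none, new_cfs.get? cf))
      PySem.Dict.empty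
      (PySem.Set.union (PySem.Set.ofList old_cfs.keys) (PySem.Set.ofList new_cfs.keys))
  if entries.size = 0 then diff else diff.insert opt entries

-- the per-option outcome both steps produce
def pvFOpt (dOld dNew : PySem.Dict String (PySem.Dict String String)) (opt : String) :
    Option (PySem.Dict String (Option String × Option String)) :=
  if (pvEntriesB (dOld.getD opt PySem.Dict.empty) (dNew.getD opt PySem.Dict.empty)).size = 0
  then none
  else some (pvEntriesB (dOld.getD opt PySem.Dict.empty) (dNew.getD opt PySem.Dict.empty))

theorem pv_A_eq (oo on : List (String × List (String × String))) :
    get_options_diff oo on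
      = (List.foldl (pvStepA (pvToDict oo) (pvToDict on)) PySem.Dict.empty
          (PySem.Set.union (PySem.Set.ofList (pvToDict oo).keys)
            (PySem.Set.ofList (pvToDict on).keys)) : PySem.Dict String _).items.map
          (fun p => (p.1, p.2.items)) := rfl

theorem pv_B_eq (oo on : List (String × List (String × String))) :
    get_options_diff_alt oo on
      = (List.foldl (pvStepB (pvToDict oo) (pvToDict on)) PySem.Dict.empty
          (PySem.Set.union (PySem.Set.ofList (pvToDict oo).keys)
            (PySem.Set.ofList (pvToDict on).keys)) : PySem.Dict String _).items.map
          (fun p => (p.1, p.2.items)) := rfl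

theorem pv_stepB_eq (dOld dNew : PySem.Dict String (PySem.Dict String String))
    (d : PySem.Dict String (PySem.Dict String (Option String × Option String))) (opt : String) :
    pvStepB dOld dNew d opt
      = (if (pvEntriesB (dOld.getD opt PySem.Dict.empty) (dNew.getD opt PySem.Dict.empty)).size = 0
         then d
         else d.insert opt
           (pvEntriesB (dOld.getD opt PySem.Dict.empty) (dNew.getD opt PySem.Dict.empty))) := rfl

theorem pv_stepA_eq (dOld dNew : PySem.Dict String (PySem.Dict String String))
    (d : PySem.Dict String (PySem.Dict String (Option String × Option String))) (opt : String)
    (hfresh : d.contains opt = false)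
    (hodn : (dOld.getD opt PySem.Dict.empty).keys.Nodup)
    (hndn : (dNew.getD opt PySem.Dict.empty).keys.Nodup) :
    pvStepA dOld dNew d opt
      = (if (pvEntriesB (dOld.getD opt PySem.Dict.empty) (dNew.getD opt PySem.Dict.empty)).size = 0
         then d
         else d.insert opt
           (pvEntriesB (dOld.getD opt PySem.Dict.empty) (dNew.getD opt PySem.Dict.empty))) := by
  have hE : ∀ (E : PySem.Dict String (Option String × Option String)),
      (if ((d.insert opt E).getD opt PySem.Dict.empty).size = 0
       then (d.insert opt E).erase opt else d.insert opt E)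
      = (if E.size = 0 then d else d.insert opt E) := by
    intro E
    rw [PySem.Dict.getD_insert_self]
    split_ifs with h
    · exact pv_erase_insert_fresh d opt E hfresh
    · rfl
  have hmod : ∀ (dd : PySem.Dict String (PySem.Dict String (Option String × Option String)))
      (inn : PySem.Dict String (Option String × Option String)) (cf : String)
      (v : Option String × Option String),
      (dd.insert opt inn).modify opt PySem.Dict.empty (fun i => i.insert cf v)
        = dd.insert opt (inn.insert cf v) := by
    intro dd inn cf v
    show (dd.insert opt inn).insert opt
      (((dd.insert opt inn).getD opt PySem.Dict.empty).insert cf v) = _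
    rw [PySem.Dict.getD_insert_self, PySem.Dict.insert_insert_self]
  unfold pvStepA
  dsimp only
  by_cases h1 : dOld.contains opt = false
  · rw [if_pos h1]
    have hod0 : dOld.getD opt PySem.Dict.empty = PySem.Dict.empty := by
      rw [PySem.Dict.getD_eq_get?_getD, (PySem.Dict.get?_eq_none_iff_contains dOld opt).mpr h1]
      rfl
    rw [pv_foldl_hom_insert (dNew.getD opt PySem.Dict.empty).keys opt _
      (fun inn cf => inn.insert cf (none, (dNew.getD opt PySem.Dict.empty).get? cf))
      (fun dd inn a => hmod dd inn a _) d PySem.Dict.empty]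
    rw [hE]
    have hEq : List.foldl (fun inn cf =>
        inn.insert cf ((none : Option String), (dNew.getD opt PySem.Dict.empty).get? cf))
        PySem.Dict.empty (dNew.getD opt PySem.Dict.empty).keys
        = pvEntriesB (dOld.getD opt PySem.Dict.empty) (dNew.getD opt PySem.Dict.empty) := by
      rw [hod0]
      apply PySem.Dict.ext
      rw [pv_items_foldl_step _ _
        (fun cf => some ((none : Option String), (dNew.getD opt PySem.Dict.empty).get? cf))
        (fun _ _ _ _ => rfl) PySem.Dict.empty hndn (fun k _ => PySem.Dict.contains_empty k)]
      rw [pv_entriesB_items PySem.Dict.empty (dNew.getD opt PySem.Dict.empty)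
        (by simp [PySem.Dict.keys_empty]) hndn]
      simp [pvF, PySem.Dict.keys_empty, PySem.Dict.get?_empty,
        show (PySem.Dict.empty : PySem.Dict String (Option String × Option String)).items = []
          from rfl]
    rw [hEq]
  · rw [if_neg h1]
    by_cases h2 : dNew.contains opt = false
    · rw [if_pos h2]
      have hnd0 : dNew.getD opt PySem.Dict.empty = PySem.Dict.empty := by
        rw [PySem.Dict.getD_eq_get?_getD, (PySem.Dict.get?_eq_none_iff_contains dNew opt).mpr h2]
        rfl
      rw [pv_foldl_hom_insert (dOld.getD opt PySem.Dict.empty).keys opt _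
        (fun inn cf => inn.insert cf ((dOld.getD opt PySem.Dict.empty).get? cf, none))
        (fun dd inn a => hmod dd inn a _) d PySem.Dict.empty]
      rw [hE]
      have hEq : List.foldl (fun inn cf =>
          inn.insert cf ((dOld.getD opt PySem.Dict.empty).get? cf, (none : Option String)))
          PySem.Dict.empty (dOld.getD opt PySem.Dict.empty).keys
          = pvEntriesB (dOld.getD opt PySem.Dict.empty) (dNew.getD opt PySem.Dict.empty) := by
        rw [hnd0]
        apply PySem.Dict.ext
        rw [pv_items_foldl_step _ _
          (fun cf => some ((dOld.getD opt PySem.Dict.empty).get? cf, (none : Option String)))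
          (fun _ _ _ _ => rfl) PySem.Dict.empty hodn (fun k _ => PySem.Dict.contains_empty k)]
        rw [pv_entriesB_items (dOld.getD opt PySem.Dict.empty) PySem.Dict.empty hodn
          (by simp [PySem.Dict.keys_empty])]
        simp only [PySem.Dict.keys_empty, List.filter_nil, List.append_nil,
          show (PySem.Dict.empty : PySem.Dict String (Option String × Option String)).items = []
            from rfl, List.nil_append]
        refine List.filterMap_congr ?_
        intro cf hcf
        have hoc : (dOld.getD opt PySem.Dict.empty).contains cf = true :=
          (PySem.Dict.contains_iff_mem_keys _ cf).mpr hcf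
        obtain ⟨ov, ho⟩ : ∃ v, (dOld.getD opt PySem.Dict.empty).get? cf = some v := by
          have hh := PySem.Dict.contains_eq_isSome_get? (d := dOld.getD opt PySem.Dict.empty) (k := cf)
          rw [hoc] at hh
          exact Option.isSome_iff_exists.mp hh.symm
        simp [pvF, ho, PySem.Dict.get?_empty]
      rw [hEq]
    · rw [if_neg h2]
      rw [pv_foldl_hom_insert (dOld.getD opt PySem.Dict.empty).keys opt _
        (fun inn cf =>
          if (dNew.getD opt PySem.Dict.empty).contains cf then
            (if (dOld.getD opt PySem.Dict.empty).get? cf ≠ (dNew.getD opt PySem.Dict.empty).get? cf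
             then inn.insert cf ((dOld.getD opt PySem.Dict.empty).get? cf,
               (dNew.getD opt PySem.Dict.empty).get? cf)
             else inn)
          else inn.insert cf ((dOld.getD opt PySem.Dict.empty).get? cf, none)) ?_ d PySem.Dict.empty]
      · rw [pv_foldl_hom_insert (dNew.getD opt PySem.Dict.empty).keys opt _
          (fun inn cf =>
            if (dOld.getD opt PySem.Dict.empty).contains cf then
              (if (dOld.getD opt PySem.Dict.empty).get? cf ≠ (dNew.getD opt PySem.Dict.empty).get? cf
               then inn.insert cf ((dOld.getD opt PySem.Dict.empty).get? cf,
                 (dNew.getD opt PySem.Dict.empty).get? cf)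
               else inn)
            else inn.insert cf (none, (dNew.getD opt PySem.Dict.empty).get? cf)) ?_ d _]
        · rw [pv_innerA_eq _ _ hodn hndn, hE]
        · intro dd inn a
          dsimp only
          split_ifs with hc hne
          · exact hmod dd inn a _
          · rfl
          · exact hmod dd inn a _
      · intro dd inn a
        dsimp only
        split_ifs with hc hne
        · exact hmod dd inn a _
        · rfl
        · exact hmod dd inn a _


theorem get_options_diff_spec_aux (opt_old opt_new : List (String × List (String × String))) :
    get_options_diff opt_old opt_new = get_options_diff_alt opt_old opt_new := by
  rw [pv_A_eq, pv_B_eq]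
  have hko : (pvToDict opt_old).keys.Nodup := PySem.Dict.nodup_keys_ofList _
  have hkn : (pvToDict opt_new).keys.Nodup := PySem.Dict.nodup_keys_ofList _
  have hO : (PySem.Set.union (PySem.Set.ofList (pvToDict opt_old).keys)
      (PySem.Set.ofList (pvToDict opt_new).keys) : List String).Nodup :=
    pv_union_keys_nodup _ _ hko hkn
  congr 1
  rw [pv_items_foldl_step _ _ (pvFOpt (pvToDict opt_old) (pvToDict opt_new)) ?_ _ hO
    (fun k _ => PySem.Dict.contains_empty k)]
  rw [pv_items_foldl_step _ _ (pvFOpt (pvToDict opt_old) (pvToDict opt_new)) ?_ _ hO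
    (fun k _ => PySem.Dict.contains_empty k)]
  · intro d k _ hf
    rw [pv_stepB_eq]
    unfold pvFOpt
    split_ifs with h <;> rfl
  · intro d k _ hf
    rw [pv_stepA_eq _ _ d k hf (pv_toDict_inner_nodup opt_old k) (pv_toDict_inner_nodup opt_new k)]
    unfold pvFOpt
    split_ifs with h <;> rfl


-- ===== VERDICT (by name: the statement is the Claim_ definition above) =====
theorem get_options_diff_spec : Claim_equal_get_options_diff := by
  intro opt_old opt_new _
  exact get_options_diff_spec_aux opt_old opt_new
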